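-- pv_equiv track=rewrite | github.com/hmk252/ARC-9th-place | src/arc_2020_ensemble_26_solutions.py | HorSym_Eq
-- ===== SOURCE A (Python) =====
-- def HorSym_Eq(x, Param):  # symmetric for reflection along a line parallel to the x axis
--     n = len(x)
--     k = len(x[0])
--     r = Param
--     Ans = []
--     for i in range(n):
--         for j in range(k):
--             i1 = r - i
--             if i1 < 0 or i1 >= n:
--                 continue
--             a = (i, j)
--             b = (i1, j)
--             i
--             if [a, b] in Ans or [b, a] in Ans or a == b:
--                 continue
--             Ans.append([a, b])
--     return Ans
-- ===== SOURCE B (Python) =====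
-- def HorSym_Eq(x, Param):
--     n = len(x)
--     k = len(x[0])
--     r = Param
--     Ans = []
--     for i in range(n):
--         i1 = r - i
--         if 0 <= i1 < n and i < i1:
--             Ans.extend([(i, j), (i1, j)] for j in range(k))
--     return Ans
-- ===== Notes on version B (the rewrite author's own statement) =====
-- stated objective: faster
-- what changed: B drops the accumulated-list membership dedup entirely: it canonicalizes each reflection pair by requiring i < r-i, so one O(nk) pass with extend replaces A's nested pass with O(|Ans|) 'in'-scans per cell.
import Mathlib
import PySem

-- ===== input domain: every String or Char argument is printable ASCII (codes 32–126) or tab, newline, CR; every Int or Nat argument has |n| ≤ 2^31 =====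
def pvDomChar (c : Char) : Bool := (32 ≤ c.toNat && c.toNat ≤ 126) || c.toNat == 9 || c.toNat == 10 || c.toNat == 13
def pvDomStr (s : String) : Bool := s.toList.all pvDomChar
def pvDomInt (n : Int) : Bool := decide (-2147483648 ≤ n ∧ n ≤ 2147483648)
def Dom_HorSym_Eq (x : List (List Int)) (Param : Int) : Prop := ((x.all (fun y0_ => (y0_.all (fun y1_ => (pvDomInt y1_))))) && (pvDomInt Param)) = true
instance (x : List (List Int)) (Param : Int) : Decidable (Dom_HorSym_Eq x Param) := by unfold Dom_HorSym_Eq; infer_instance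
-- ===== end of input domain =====

-- B replaces A's quadratic accumulated-list dedup by emitting each reflection pair once,
-- canonicalized with i < r-i, in a single pass (objective: faster; return value only).

-- ===== PORT A =====
def HorSym_Eq (x : List (List Int)) (Param : Int) : List (List (Int × Int)) :=
  match PySem.List.pyGet? x 0 with
  | none => []          -- Python: len(x[0]) raises IndexError (excluded by Pre_)
  | some row =>
    let n : Int := x.length
    let k : Int := row.length
    let r : Int := Param
    (PySem.List.pyRange 0 n 1).foldl (fun Ans i =>
      (PySem.List.pyRange 0 k 1).foldl (fun Ans j =>
        if r - i < 0 ∨ n ≤ r - i then Ans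
        else
          if [(i, j), (r - i, j)] ∈ Ans ∨ [(r - i, j), (i, j)] ∈ Ans ∨ (i, j) = (r - i, j) then Ans
          else Ans ++ [[(i, j), (r - i, j)]]) Ans) []

-- ===== PORT B =====
def HorSym_Eq_alt (x : List (List Int)) (Param : Int) : List (List (Int × Int)) :=
  match PySem.List.pyGet? x 0 with
  | none => []          -- Python: len(x[0]) raises IndexError (excluded by Pre_)
  | some row =>
    let n : Int := x.length
    let k : Int := row.length
    let r : Int := Param
    (PySem.List.pyRange 0 n 1).foldl (fun Ans i =>
      if 0 ≤ r - i ∧ r - i < n ∧ i < r - i then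
        Ans ++ (PySem.List.pyRange 0 k 1).map (fun j => [(i, j), (r - i, j)])
      else Ans) []

-- ===== PRECONDITION & SPEC =====
-- Pre_ excludes exactly the inputs where A raises: x = [] makes len(x[0]) an IndexError.
def Pre_HorSym_Eq (x : List (List Int)) (Param : Int) : Prop := x.isEmpty = false
instance (x : List (List Int)) (Param : Int) : Decidable (Pre_HorSym_Eq x Param) := by unfold Pre_HorSym_Eq; infer_instance
def pvWitness_HorSym_Eq : List (List Int) × Int := ([[1, 2], [3, 4]], 1)
def Spec_HorSym_Eq (x : List (List Int)) (Param : Int) (out : List (List (Int × Int))) : Prop := out = HorSym_Eq_alt x Param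
instance (x : List (List Int)) (Param : Int) (out : List (List (Int × Int))) : Decidable (Spec_HorSym_Eq x Param out) := by unfold Spec_HorSym_Eq; infer_instance

-- ===== CLAIM (what is proved, stated in full; the proofs are below) =====
def Claim_equal_HorSym_Eq : Prop := ∀ (x : List (List Int)) (Param : Int), Dom_HorSym_Eq x Param → Pre_HorSym_Eq x Param → Spec_HorSym_Eq x Param (HorSym_Eq x Param)

-- ===== LEMMAS AND PROOFS =====

-- the canonical block of pairs emitted for row i (empty unless i is the smaller partner)
def pvBlock (n r : Int) (kk : Nat) (i : Int) : List (List (Int × Int)) :=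
  if 0 ≤ r - i ∧ r - i < n ∧ i < r - i then
    (List.range kk).map (fun q : Nat => [(i, (q : Int)), (r - i, (q : Int))])
  else []

def pvAcc (n r : Int) (kk : Nat) (m : Nat) : List (List (Int × Int)) :=
  (List.range m).flatMap (fun p : Nat => pvBlock n r kk (p : Int))

lemma pvMemAcc (n r : Int) (kk m : Nat) (l : List (Int × Int)) :
    l ∈ pvAcc n r kk m ↔ ∃ p : Nat, p < m ∧ ∃ q : Nat, q < kk ∧
      (0 ≤ r - (p : Int) ∧ r - (p : Int) < n ∧ (p : Int) < r - (p : Int)) ∧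
      l = [((p : Int), (q : Int)), (r - (p : Int), (q : Int))] := by
  simp only [pvAcc, List.mem_flatMap, List.mem_range]
  constructor
  · rintro ⟨p, hp, hl⟩
    by_cases hc : 0 ≤ r - (p : Int) ∧ r - (p : Int) < n ∧ (p : Int) < r - (p : Int)
    · rw [pvBlock, if_pos hc] at hl
      rcases List.mem_map.mp hl with ⟨q, hq, rfl⟩
      exact ⟨p, hp, q, List.mem_range.mp hq, hc, rfl⟩
    · rw [pvBlock, if_neg hc] at hl; simp at hl
  · rintro ⟨p, hp, q, hq, hc, rfl⟩
    refine ⟨p, hp, ?_⟩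
    rw [pvBlock, if_pos hc]
    exact List.mem_map.mpr ⟨q, List.mem_range.mpr hq, rfl⟩

-- inner loop, invalid reflected index: nothing is appended
lemma pvInner_invalid (n r i : Int) (hv : r - i < 0 ∨ n ≤ r - i) :
    ∀ (js : List Int) (acc : List (List (Int × Int))),
      js.foldl (fun Ans j =>
        if r - i < 0 ∨ n ≤ r - i then Ans
        else
          if [(i, j), (r - i, j)] ∈ Ans ∨ [(r - i, j), (i, j)] ∈ Ans ∨ (i, j) = (r - i, j) then Ans
          else Ans ++ [[(i, j), (r - i, j)]]) acc = acc := by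
  intro js
  induction js with
  | nil => intro acc; rfl
  | cons j js ih =>
    intro acc
    simp only [List.foldl_cons]
    rw [if_pos hv]
    exact ih acc

-- inner loop, every j hits one of the skip disjuncts: nothing is appended
lemma pvInner_skip (n r i : Int) (hv : ¬ (r - i < 0 ∨ n ≤ r - i)) :
    ∀ (js : List Int) (acc : List (List (Int × Int))),
      (∀ j ∈ js, [(i, j), (r - i, j)] ∈ acc ∨ [(r - i, j), (i, j)] ∈ acc ∨ (i, j) = (r - i, j)) →
      js.foldl (fun Ans j =>
        if r - i < 0 ∨ n ≤ r - i then Ans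
        else
          if [(i, j), (r - i, j)] ∈ Ans ∨ [(r - i, j), (i, j)] ∈ Ans ∨ (i, j) = (r - i, j) then Ans
          else Ans ++ [[(i, j), (r - i, j)]]) acc = acc := by
  intro js
  induction js with
  | nil => intro acc _; rfl
  | cons j js ih =>
    intro acc h
    simp only [List.foldl_cons]
    rw [if_neg hv, if_pos (h j (List.mem_cons_self ..))]
    exact ih acc (fun j' hj' => h j' (List.mem_cons_of_mem _ hj'))

-- inner loop, fresh canonical row (i < r-i, valid): every j is appended in order
lemma pvInner_append (n r i : Int) (hv : ¬ (r - i < 0 ∨ n ≤ r - i)) (hlt : i < r - i) :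
    ∀ (js : List Int), js.Nodup → ∀ (acc : List (List (Int × Int))),
      (∀ j ∈ js, [(i, j), (r - i, j)] ∉ acc ∧ [(r - i, j), (i, j)] ∉ acc) →
      js.foldl (fun Ans j =>
        if r - i < 0 ∨ n ≤ r - i then Ans
        else
          if [(i, j), (r - i, j)] ∈ Ans ∨ [(r - i, j), (i, j)] ∈ Ans ∨ (i, j) = (r - i, j) then Ans
          else Ans ++ [[(i, j), (r - i, j)]]) acc
        = acc ++ js.map (fun j => [(i, j), (r - i, j)]) := by
  intro js
  induction js with
  | nil => intro _ acc _; simp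
  | cons j js ih =>
    intro hnd acc h
    have hne : i ≠ r - i := by omega
    have hj := h j (List.mem_cons_self ..)
    have hskip : ¬ ([(i, j), (r - i, j)] ∈ acc ∨ [(r - i, j), (i, j)] ∈ acc ∨ (i, j) = (r - i, j)) := by
      push Not
      exact ⟨hj.1, hj.2, by simp [hne]⟩
    simp only [List.foldl_cons]
    rw [if_neg hv, if_neg hskip]
    rw [ih (List.nodup_cons.mp hnd).2 (acc ++ [[(i, j), (r - i, j)]]) ?_]
    · simp
    · intro j' hj'
      have hne' : j' ≠ j := fun hEq => (List.nodup_cons.mp hnd).1 (hEq ▸ hj')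
      have := h j' (List.mem_cons_of_mem _ hj')
      constructor
      · simp only [List.mem_append, List.mem_singleton]
        rintro (hin | hEq)
        · exact this.1 hin
        · simp at hEq
          exact hne' (by omega)
      · simp only [List.mem_append, List.mem_singleton]
        rintro (hin | hEq)
        · exact this.2 hin
        · simp at hEq
          omega

-- outer loop of A builds exactly the concatenation of canonical blocks
lemma pvOuter (n r : Int) (kk : Nat) (_hn : 0 ≤ n) : ∀ (m : Nat), (m : Int) ≤ n →
    ((List.range m).map (fun p : Nat => (p : Int))).foldl (fun Ans i =>
      ((List.range kk).map (fun q : Nat => (q : Int))).foldl (fun Ans j =>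
        if r - i < 0 ∨ n ≤ r - i then Ans
        else
          if [(i, j), (r - i, j)] ∈ Ans ∨ [(r - i, j), (i, j)] ∈ Ans ∨ (i, j) = (r - i, j) then Ans
          else Ans ++ [[(i, j), (r - i, j)]]) Ans) []
    = pvAcc n r kk m := by
  intro m
  induction m with
  | zero => intro _; rfl
  | succ m ih =>
    intro hm
    have hm' : (m : Int) ≤ n := by push_cast at hm ⊢; omega
    have hmn : (m : Int) < n := by push_cast at hm; omega
    rw [List.range_succ, List.map_append, List.foldl_append, ih hm']
    simp only [List.map_cons, List.map_nil, List.foldl_cons, List.foldl_nil]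
    have hblk : pvAcc n r kk (m + 1) = pvAcc n r kk m ++ pvBlock n r kk (m : Int) := by
      simp [pvAcc, List.range_succ]
    rw [hblk]
    by_cases hv : r - (m : Int) < 0 ∨ n ≤ r - (m : Int)
    · rw [pvInner_invalid n r (m : Int) hv]
      have hb : pvBlock n r kk (m : Int) = [] := by
        rw [pvBlock, if_neg]; omega
      rw [hb, List.append_nil]
    · rcases lt_trichotomy ((m : Int)) (r - (m : Int)) with hlt | heq | hgt
      · -- fresh canonical row: append the whole block
        rw [pvInner_append n r (m : Int) hv hlt ((List.range kk).map (fun q : Nat => (q : Int)))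
            (List.Nodup.map (fun a b hab => by exact_mod_cast hab) (List.nodup_range))
            (pvAcc n r kk m) ?_]
        · rw [pvBlock, if_pos (by omega), List.map_map]
          rfl
        · intro j hj
          rcases List.mem_map.mp hj with ⟨q, _, rfl⟩
          constructor
          · intro hin
            rcases (pvMemAcc n r kk m _).mp hin with ⟨p, hp, q', _, hc, hEq⟩
            simp at hEq
            omega
          · intro hin
            rcases (pvMemAcc n r kk m _).mp hin with ⟨p, hp, q', _, hc, hEq⟩
            simp at hEq
            omega
      · -- fixed point i = r - i: a == b, everything skipped
        rw [pvInner_skip n r (m : Int) hv ((List.range kk).map (fun q : Nat => (q : Int)))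
            (pvAcc n r kk m) (fun j _ => Or.inr (Or.inr (by rw [← heq])))]
        have hb : pvBlock n r kk (m : Int) = [] := by
          rw [pvBlock, if_neg]; omega
        rw [hb, List.append_nil]
      · -- mirror of an earlier row: [b, a] is already present
        rw [pvInner_skip n r (m : Int) hv ((List.range kk).map (fun q : Nat => (q : Int)))
            (pvAcc n r kk m) ?_]
        · have hb : pvBlock n r kk (m : Int) = [] := by
            rw [pvBlock, if_neg]; omega
          rw [hb, List.append_nil]
        · intro j hj
          rcases List.mem_map.mp hj with ⟨q, hq, rfl⟩
          right; left
          refine (pvMemAcc n r kk m _).mpr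
            ⟨(r - (m : Int)).toNat, by omega, q, List.mem_range.mp hq, ⟨by omega, by omega, by omega⟩, ?_⟩
          have h1 : (((r - (m : Int)).toNat : Nat) : Int) = r - (m : Int) := by omega
          rw [h1]
          have h2 : r - (r - (m : Int)) = (m : Int) := by ring
          rw [h2]

-- B: outer fold is the same concatenation of blocks
lemma pvAlt (n r : Int) (kk : Nat) (acc : List (List (Int × Int))) (is_ : List Int) :
    is_.foldl (fun Ans i =>
      if 0 ≤ r - i ∧ r - i < n ∧ i < r - i then
        Ans ++ ((List.range kk).map (fun q : Nat => (q : Int))).map (fun j => [(i, j), (r - i, j)])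
      else Ans) acc = acc ++ is_.flatMap (fun i => pvBlock n r kk i) := by
  have hstep : (fun (Ans : List (List (Int × Int))) (i : Int) =>
      if 0 ≤ r - i ∧ r - i < n ∧ i < r - i then
        Ans ++ ((List.range kk).map (fun q : Nat => (q : Int))).map (fun j => [(i, j), (r - i, j)])
      else Ans) = fun Ans i => Ans ++ pvBlock n r kk i := by
    funext Ans i
    by_cases hc : 0 ≤ r - i ∧ r - i < n ∧ i < r - i
    · rw [if_pos hc, pvBlock, if_pos hc, List.map_map]
      rfl
    · rw [if_neg hc, pvBlock, if_neg hc, List.append_nil]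
  rw [hstep, PySem.List.foldl_append_eq_flatMap]

-- ===== VERDICT (by name: the statement is the Claim_ definition above) =====
theorem HorSym_Eq_spec : Claim_equal_HorSym_Eq := by
  intro x Param _ hpre
  unfold Spec_HorSym_Eq HorSym_Eq HorSym_Eq_alt
  cases hg : PySem.List.pyGet? x 0 with
  | none =>
    exfalso
    cases x with
    | nil => simp [Pre_HorSym_Eq] at hpre
    | cons a l => simp [PySem.List.pyGet?, PySem.List.pyIdx?] at hg
  | some row =>
    simp only [PySem.List.pyRange_one, sub_zero, Int.toNat_natCast, zero_add]
    rw [pvAlt ((x.length : Int)) Param row.length, pvOuter ((x.length : Int)) Param row.length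
        (by positivity) x.length (le_refl _)]
    rw [List.nil_append, List.flatMap_map]
    rfl
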